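-- pv_equiv track=rewrite | github.com/pascaldisse/open-sourcefy | src/core/reconstruction_quality_scorer.py | _estimate_function_length
-- ===== SOURCE A (Python) =====
-- def _estimate_function_length(content: str, start_pos: int) -> int:
--     """Estimate function length by counting braces"""
--     brace_count = 0
--     lines = 1
--
--     for i, char in enumerate(content[start_pos:], start_pos):
--         if char == '\n':
--             lines += 1
--         elif char == '{':
--             brace_count += 1
--         elif char == '}':
--             brace_count -= 1
--             if brace_count == 0:
--                 break
--
--     return lines
-- ===== SOURCE B (Python) =====
-- def _estimate_function_length(content: str, start_pos: int) -> int: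
--     """Extract brace events, find where the running balance first closes at a '}',
--     then count newlines before that point."""
--     s = content[start_pos:]
--     events = [(i, 1 if c == '{' else -1) for i, c in enumerate(s) if c in '{}']
--     end = len(s)
--     balance = 0
--     for i, delta in events:
--         balance += delta
--         if delta == -1 and balance == 0:
--             end = i
--             break
--     return s.count('\n', 0, end) + 1
-- ===== Notes on version B (the rewrite author's own statement) =====
-- stated objective: alternative
-- what changed: B builds an explicit list of brace events (index, +1/-1), finds the closing position by a prefix-sum search over that event list (braces only, no per-character branching on newlines), and finally counts newlines with str.count; A fuses newline counting and brace tracking in one character loop.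
import Mathlib
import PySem

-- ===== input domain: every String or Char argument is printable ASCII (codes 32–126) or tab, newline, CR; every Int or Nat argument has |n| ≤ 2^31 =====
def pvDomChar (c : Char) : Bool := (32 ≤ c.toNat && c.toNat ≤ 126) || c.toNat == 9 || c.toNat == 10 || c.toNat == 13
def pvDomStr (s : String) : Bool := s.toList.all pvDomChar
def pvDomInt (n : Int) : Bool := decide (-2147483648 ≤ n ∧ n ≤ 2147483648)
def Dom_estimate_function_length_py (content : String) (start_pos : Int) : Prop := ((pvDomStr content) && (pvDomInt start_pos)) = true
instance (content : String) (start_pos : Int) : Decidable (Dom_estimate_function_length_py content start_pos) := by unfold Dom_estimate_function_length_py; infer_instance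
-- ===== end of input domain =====

-- B replaces A's fused character loop by: extract brace events (index, ±1), prefix-sum search
-- over the events for the closing position, then count newlines; alternative decomposition.

-- ===== PORT A =====
-- the for-loop of A: state (brace_count, lines), early break on a '}' reaching balance 0
def pvLoopA : List Char → Int → Int → Int
  | [], _, lines => lines
  | c :: cs, bc, lines =>
    if c = '\n' then pvLoopA cs bc (lines + 1)
    else if c = '{' then pvLoopA cs (bc + 1) lines
    else if c = '}' then (if bc - 1 = 0 then lines else pvLoopA cs (bc - 1) lines)
    else pvLoopA cs bc lines

def estimate_function_length_py (content : String) (start_pos : Int) : Int :=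
  pvLoopA (PySem.List.slice content.toList (some start_pos) none) 0 1

-- ===== PORT B =====
-- Source B's event list: [(i, 1 if c == '{' else -1) for i, c in enumerate(s) if c in '{}']
def pvEvents (s : List Char) : List (Int × Int) :=
  (PySem.List.enumerate s).filterMap
    (fun p => if p.2 = '{' ∨ p.2 = '}' then some (p.1, if p.2 = '{' then 1 else -1) else none)

-- Source B's search loop: running balance over the events, stop at a -1 event reaching balance 0
def pvFindEnd : List (Int × Int) → Int → Int → Int
  | [], _, dflt => dflt
  | e :: es, balance, dflt =>
    if e.2 = -1 ∧ balance + e.2 = 0 then e.1 else pvFindEnd es (balance + e.2) dflt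

def estimate_function_length_py_alt (content : String) (start_pos : Int) : Int :=
  let s := PySem.List.slice content.toList (some start_pos) none
  let endPos := pvFindEnd (pvEvents s) 0 (s.length : Int)
  ((PySem.List.slice s none (some endPos)).count '\n' : Int) + 1

-- ===== PRECONDITION & SPEC =====
def Spec_estimate_function_length_py (content : String) (start_pos : Int) (out : Int) : Prop := out = estimate_function_length_py_alt content start_pos
instance (content : String) (start_pos : Int) (out : Int) : Decidable (Spec_estimate_function_length_py content start_pos out) := by unfold Spec_estimate_function_length_py; infer_instance

-- ===== CLAIM (what is proved, stated in full; the proofs are below) =====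
def Claim_equal_estimate_function_length_py : Prop := ∀ (content : String) (start_pos : Int), Dom_estimate_function_length_py content start_pos → Spec_estimate_function_length_py content start_pos (estimate_function_length_py content start_pos)

-- ===== LEMMAS AND PROOFS =====

-- char-level stop index: first position whose '}' brings the balance to 0 (none if never)
def pvStop? : List Char → Int → Option Nat
  | [], _ => none
  | c :: cs, d =>
    if c = '{' then (pvStop? cs (d + 1)).map (· + 1)
    else if c = '}' then (if d - 1 = 0 then some 0 else (pvStop? cs (d - 1)).map (· + 1))
    else (pvStop? cs d).map (· + 1)

lemma pvLoopA_eq (cs : List Char) : ∀ bc lines : Int,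
    pvLoopA cs bc lines = lines + ((cs.take ((pvStop? cs bc).getD cs.length)).count '\n' : Int) := by
  induction cs with
  | nil => intro bc lines; simp [pvLoopA, pvStop?]
  | cons c cs ih =>
    intro bc lines
    by_cases h1 : c = '\n'
    · simp [pvLoopA, pvStop?, h1, List.take_succ_cons, ih]; ring
    · by_cases h2 : c = '{'
      · simp [pvLoopA, pvStop?, h2, List.take_succ_cons, ih]
      · by_cases h3 : c = '}'
        · by_cases h4 : bc - 1 = 0
          · simp [pvLoopA, pvStop?, h3, h4]
          · simp [pvLoopA, pvStop?, h3, h4, List.take_succ_cons, ih]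
        · simp [pvLoopA, pvStop?, h1, h2, h3, List.take_succ_cons, ih]

-- event-list search agrees with the char-level stop index (generalised over the enumerate offset)
lemma pvFindEnd_enumerate (cs : List Char) : ∀ (off bc dflt : Int),
    pvFindEnd ((PySem.List.enumerate cs off).filterMap
        (fun p => if p.2 = '{' ∨ p.2 = '}' then some (p.1, if p.2 = '{' then 1 else -1) else none)) bc dflt
      = match pvStop? cs bc with
        | some k => off + (k : Int)
        | none => dflt := by
  induction cs with
  | nil => intro off bc dflt; simp [PySem.List.enumerate_nil, pvFindEnd, pvStop?]
  | cons c cs ih =>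
    intro off bc dflt
    rw [PySem.List.enumerate_cons]
    by_cases h2 : c = '{'
    · have hf : (((off, c) :: PySem.List.enumerate cs (off + 1)).filterMap
          (fun p => if p.2 = '{' ∨ p.2 = '}' then some (p.1, if p.2 = '{' then 1 else -1) else none))
          = (off, (1 : Int)) :: ((PySem.List.enumerate cs (off + 1)).filterMap
          (fun p => if p.2 = '{' ∨ p.2 = '}' then some (p.1, if p.2 = '{' then 1 else -1) else none)) := by
        simp [h2]
      rw [hf]
      simp only [pvFindEnd]
      norm_num
      rw [ih]
      cases h : pvStop? cs (bc + 1) <;> simp [pvStop?, h2, h] <;> ring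
    · by_cases h3 : c = '}'
      · have hf : (((off, c) :: PySem.List.enumerate cs (off + 1)).filterMap
            (fun p => if p.2 = '{' ∨ p.2 = '}' then some (p.1, if p.2 = '{' then 1 else -1) else none))
            = (off, (-1 : Int)) :: ((PySem.List.enumerate cs (off + 1)).filterMap
            (fun p => if p.2 = '{' ∨ p.2 = '}' then some (p.1, if p.2 = '{' then 1 else -1) else none)) := by
          simp [h3]
        rw [hf]
        simp only [pvFindEnd]
        by_cases h4 : bc - 1 = 0
        · have hc : (True ∧ bc + (-1:Int) = 0) := ⟨trivial, by omega⟩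
          rw [if_pos hc]
          simp [pvStop?, h3, h4]
        · have hc : ¬ (True ∧ bc + (-1:Int) = 0) := by
            rintro ⟨-, hb⟩; omega
          rw [if_neg hc, ih]
          have e1 : bc + (-1:Int) = bc - 1 := by ring
          rw [e1]
          have e2 : pvStop? (c :: cs) bc = (pvStop? cs (bc - 1)).map (· + 1) := by
            simp [pvStop?, h3, h4]
          rw [e2]
          cases h : pvStop? cs (bc - 1) <;> simp <;> ring
      · have hf : (((off, c) :: PySem.List.enumerate cs (off + 1)).filterMap
            (fun p => if p.2 = '{' ∨ p.2 = '}' then some (p.1, if p.2 = '{' then 1 else -1) else none))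
            = ((PySem.List.enumerate cs (off + 1)).filterMap
            (fun p => if p.2 = '{' ∨ p.2 = '}' then some (p.1, if p.2 = '{' then 1 else -1) else none)) := by
          simp [h2, h3]
        rw [hf, ih]
        cases h : pvStop? cs bc <;> simp [pvStop?, h2, h3, h] <;> ring

lemma pvMainProved (s : List Char) (bc lines : Int) :
    pvLoopA s bc lines
      = lines + ((PySem.List.slice s none (some (pvFindEnd (pvEvents s) bc (s.length : Int)))).count '\n' : Int) := by
  have he := pvFindEnd_enumerate s 0 bc (s.length : Int)
  unfold pvEvents
  cases h : pvStop? s bc with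
  | none =>
    rw [h] at he
    rw [he, PySem.List.slice_to_natCast]
    simpa [h] using pvLoopA_eq s bc lines
  | some k =>
    rw [h] at he
    simp only [zero_add] at he
    rw [he, PySem.List.slice_to_natCast]
    simpa [h] using pvLoopA_eq s bc lines

-- ===== VERDICT (by name: the statement is the Claim_ definition above) =====
theorem estimate_function_length_py_spec : Claim_equal_estimate_function_length_py := by
  intro content start_pos _
  unfold Spec_estimate_function_length_py estimate_function_length_py estimate_function_length_py_alt
  rw [pvMainProved]
  ring
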